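-- pv_equiv track=rewrite | github.com/Cryb01z/Grand-Project | Tool/deface.py | get_kgram_hashes
-- ===== SOURCE A (Python) =====
-- def get_kgram_hashes(url: str, k_gram: int, basis: int):
--     """Generate k-gram hashes for URL."""
--     hashes = []
--     powers = [basis ** i for i in range(k_gram, -1, -1)]
--
--     for start in range(len(url) - k_gram + 1):
--         hash_value = 0
--         for i in range(k_gram):
--             hash_value += ord(url[start + i]) * powers[i]
--         hashes.append(hash_value)
--
--     return hashes
-- ===== SOURCE B (Python) =====
-- def get_kgram_hashes(url: str, k_gram: int, basis: int):
--     """Generate k-gram hashes for URL with an incremental rolling hash.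
--
--     Each window's hash weights its characters basis**k_gram .. basis**1
--     (last position has weight basis), so a window's hash is obtained in
--     O(1) from the previous one: drop the leading term, shift, add the
--     new character at weight basis.
--     """
--     n = len(url)
--     if n < k_gram:
--         return []
--     codes = [ord(c) for c in url]
--     powers = [basis ** e for e in range(k_gram, 0, -1)]
--     top = basis ** k_gram
--     h = sum(c * p for c, p in zip(codes, powers))
--     hashes = [h]
--     for j in range(k_gram, n):
--         h = (h - codes[j - k_gram] * top) * basis + codes[j] * basis
--         hashes.append(h)
--     return hashes
-- ===== Notes on version B (the rewrite author's own statement) =====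
-- stated objective: faster
-- what changed: Replaces the per-window inner loop (recomputing the whole polynomial hash for every start) with an incremental rolling hash updated in O(1) per window; Pre_ excludes negative k_gram, where A's count of zero hashes comes from range arithmetic and B raises IndexError.
-- outside the precondition, e.g. on get_kgram_hashes('ab', -1, 3): A returns [0, 0, 0, 0], B raises IndexError
import Mathlib
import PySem

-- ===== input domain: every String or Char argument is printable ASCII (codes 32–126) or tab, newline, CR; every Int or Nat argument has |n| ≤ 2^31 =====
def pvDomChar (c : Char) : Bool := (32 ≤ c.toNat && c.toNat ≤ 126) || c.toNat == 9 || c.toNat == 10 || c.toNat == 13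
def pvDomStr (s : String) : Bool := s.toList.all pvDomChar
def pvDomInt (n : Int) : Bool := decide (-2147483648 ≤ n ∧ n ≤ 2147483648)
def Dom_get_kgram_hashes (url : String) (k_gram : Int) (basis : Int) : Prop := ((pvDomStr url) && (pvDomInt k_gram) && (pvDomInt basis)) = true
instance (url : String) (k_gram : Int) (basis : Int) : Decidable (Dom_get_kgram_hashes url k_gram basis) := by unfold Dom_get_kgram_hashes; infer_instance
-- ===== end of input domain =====

-- B replaces A's per-window inner loop by an incremental rolling hash (O(1) update per
-- window); a timing run measures the speed label. Return values only (no mutation).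

-- ===== PORT A =====
-- literal port of A: powers table, then for each start a fresh inner loop summing
-- ord(url[start+i]) * powers[i].  Every index used at runtime is in range, so pyGetD _ _ 0
-- is exact; every i produced by range(k_gram, -1, -1) is ≥ 0, so 'basis ^ i.toNat' is Python's '**'.
def get_kgram_hashes (url : String) (k_gram : Int) (basis : Int) : List Int :=
  let cs : List Int := url.toList.map (fun c => (c.toNat : Int))
  let powers : List Int := (PySem.List.pyRange k_gram (-1) (-1)).map (fun i => basis ^ i.toNat)
  (PySem.List.pyRange 0 ((cs.length : Int) - k_gram + 1) 1).foldl
    (fun hashes start =>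
      hashes ++ [(PySem.List.pyRange 0 k_gram 1).foldl
        (fun h i => h + PySem.List.pyGetD cs (start + i) 0 * PySem.List.pyGetD powers i 0) 0])
    []

-- ===== PORT B =====
-- literal port of Source B: sum of the first window against the powers table, then one O(1)
-- rolling update per further character.  On Pre_ (0 ≤ k_gram) every exponent is ≥ 0, so
-- '^ ·.toNat' is Python's '**', and every runtime index j, j - k_gram is in range, so
-- pyGetD _ _ 0 is exact.
def get_kgram_hashes_alt (url : String) (k_gram : Int) (basis : Int) : List Int :=
  let n : Int := (url.toList.length : Int)
  if n < k_gram then []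
  else
    let codes : List Int := url.toList.map (fun c => (c.toNat : Int))
    let powers : List Int := (PySem.List.pyRange k_gram 0 (-1)).map (fun e => basis ^ e.toNat)
    let top : Int := basis ^ k_gram.toNat
    let h0 : Int := (codes.zip powers).foldl (fun (a : Int) (cp : Int × Int) => a + cp.1 * cp.2) 0
    ((PySem.List.pyRange k_gram n 1).foldl
      (fun (st : Int × List Int) j =>
        let h := (st.1 - PySem.List.pyGetD codes (j - k_gram) 0 * top) * basis
                   + PySem.List.pyGetD codes j 0 * basis
        (h, st.2 ++ [h]))
      (h0, [h0])).2

-- ===== PRECONDITION & SPEC =====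
-- Pre_ excludes negative k_gram, on which A still returns len(url)-k_gram+1 zeros (an
-- accident of its range arithmetic: more "windows" than the string has) while B raises
-- IndexError; everything else (k_gram ≥ 0, any string, any basis) is admitted.
def Pre_get_kgram_hashes (url : String) (k_gram : Int) (basis : Int) : Prop := 0 ≤ k_gram
instance (url : String) (k_gram : Int) (basis : Int) : Decidable (Pre_get_kgram_hashes url k_gram basis) := by unfold Pre_get_kgram_hashes; infer_instance
def pvWitness_get_kgram_hashes : String × Int × Int := ("ab", 2, 3)

def Spec_get_kgram_hashes (url : String) (k_gram : Int) (basis : Int) (out : List Int) : Prop := out = get_kgram_hashes_alt url k_gram basis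
instance (url : String) (k_gram : Int) (basis : Int) (out : List Int) : Decidable (Spec_get_kgram_hashes url k_gram basis out) := by unfold Spec_get_kgram_hashes; infer_instance

-- ===== CLAIM (what is proved, stated in full; the proofs are below) =====
def Claim_equal_get_kgram_hashes : Prop := ∀ (url : String) (k_gram : Int) (basis : Int), Dom_get_kgram_hashes url k_gram basis → Pre_get_kgram_hashes url k_gram basis → Spec_get_kgram_hashes url k_gram basis (get_kgram_hashes url k_gram basis)

-- ===== LEMMAS AND PROOFS =====

-- Horner evaluation of a list of coefficients.
def hornerH (b : Int) (l : List Int) : Int := l.foldl (fun g c => g * b + c) 0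

-- hash of the window of length K starting at s (up to the overall factor b)
def winH (b : Int) (cs : List Int) (K s : Nat) : Int := hornerH b ((cs.drop s).take K)

theorem foldl_horner_shift (b : Int) (l : List Int) (a : Int) :
    l.foldl (fun g c => g * b + c) a = a * b ^ l.length + hornerH b l := by
  induction l generalizing a with
  | nil => simp [hornerH]
  | cons c l ih =>
    have h2 : hornerH b (c :: l) = (0 * b + c) * b ^ l.length + hornerH b l := by
      rw [hornerH, List.foldl_cons]; exact ih _
    rw [List.foldl_cons, ih, h2, List.length_cons]
    ring

theorem hornerH_append (b : Int) (l : List Int) (x : Int) :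
    hornerH b (l ++ [x]) = hornerH b l * b + x := by
  simp [hornerH]

theorem hornerH_cons (b : Int) (c : Int) (l : List Int) :
    hornerH b (c :: l) = c * b ^ l.length + hornerH b l := by
  have := foldl_horner_shift b l c
  simpa [hornerH] using this

-- A's inner loop, prefix-generalized: after m of the K terms the accumulator is
-- b^(K-m) * b * hornerH(first m chars of the window).
theorem A_inner_m (b : Int) (cs : List Int) (K s m : Nat) (hm : m ≤ K)
    (hs : s + m ≤ cs.length) :
    (PySem.List.pyRange 0 (m : Int) 1).foldl
      (fun h i => h + PySem.List.pyGetD cs ((s : Int) + i) 0 *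
        PySem.List.pyGetD ((PySem.List.pyRange (K : Int) (-1) (-1)).map (fun i => b ^ i.toNat)) i 0) 0
    = b ^ (K - m) * (b * hornerH b ((cs.drop s).take m)) := by
  induction m with
  | zero => simp [PySem.List.pyRange_one_eq_nil, hornerH]
  | succ m ih =>
    have hm' : m ≤ K := Nat.le_of_succ_le hm
    have hs' : s + m ≤ cs.length := by omega
    have hcast : ((m : Int) + 1) = ((m + 1 : Nat) : Int) := by push_cast; ring
    rw [← hcast, PySem.List.pyRange_one_succ_right (by positivity), List.foldl_append, ih hm' hs']
    have hsm : s + m < cs.length := by omega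
    have h1 : PySem.List.pyGetD cs ((s : Int) + (m : Int)) 0 = cs[s + m]'hsm := by
      have : ((s : Int) + (m : Int)) = ((s + m : Nat) : Int) := by push_cast; ring
      rw [this, PySem.List.pyGetD_natCast]
      simp [List.getD_eq_getElem?_getD, hsm]
    have h2 : PySem.List.pyGetD ((PySem.List.pyRange (K : Int) (-1) (-1)).map (fun i => b ^ i.toNat)) (m : Int) 0
        = b ^ (K - m) := by
      rw [PySem.List.pyRange_neg_one, List.map_map, PySem.List.pyGetD_natCast]
      have hlen : m < ((K : Int) - (-1)).toNat := by omega
      rw [List.getD_eq_getElem?_getD, List.getElem?_map, List.getElem?_range hlen]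
      simp only [Option.map_some, Option.getD_some, Function.comp]
      congr 1
      omega
    rw [List.foldl_cons, List.foldl_nil, h1, h2]
    have htake : (cs.drop s).take (m + 1) = (cs.drop s).take m ++ [cs[s + m]'hsm] := by
      rw [List.take_succ]
      congr 1
      rw [List.getElem?_drop]
      simp [hsm]
    rw [htake, hornerH_append]
    have hKm : K - m = (K - (m + 1)) + 1 := by omega
    rw [hKm, pow_succ]
    ring

-- the plain rolling-hash step (window length ≥ 1)
theorem roll_step (b : Int) (cs : List Int) (K s : Nat) (hK : 1 ≤ K)
    (hs : s + K < cs.length) :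
    (winH b cs K s - cs[s]'(by omega) * b ^ (K - 1)) * b + cs[s + K]'hs = winH b cs K (s + 1) := by
  obtain ⟨K', rfl⟩ : ∃ K', K = K' + 1 := ⟨K - 1, by omega⟩
  have hsN : s < cs.length := by omega
  have hs' : s + (K' + 1) < cs.length := hs
  have hdrop : cs.drop s = cs[s]'hsN :: cs.drop (s + 1) := List.drop_eq_getElem_cons hsN
  have hw'len : ((cs.drop (s + 1)).take K').length = K' := by
    simp [List.length_take, List.length_drop]
    omega
  have hGs : winH b cs (K' + 1) s
      = cs[s]'hsN * b ^ K' + hornerH b ((cs.drop (s + 1)).take K') := by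
    rw [winH, hdrop, List.take_succ_cons, hornerH_cons, hw'len]
  have hidx : (cs.drop (s + 1))[K']? = some (cs[s + (K' + 1)]'hs') := by
    rw [List.getElem?_drop]
    have h9 : s + 1 + K' = s + (K' + 1) := by omega
    simp only [h9]
    simp [hs']
  have hGs1 : winH b cs (K' + 1) (s + 1)
      = hornerH b ((cs.drop (s + 1)).take K') * b + cs[s + (K' + 1)]'hs' := by
    rw [winH, List.take_succ, hidx]
    simp [hornerH_append]
  simp only [Nat.add_sub_cancel] at *
  rw [hGs, hGs1]
  ring

-- B's rolling step on the weighted hash b * winH, valid for every K ≥ 0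
theorem roll_step' (b : Int) (cs : List Int) (K s : Nat) (hs : s + K < cs.length) :
    (b * winH b cs K s - cs[s]'(by omega) * b ^ K) * b + cs[s + K]'hs * b
      = b * winH b cs K (s + 1) := by
  cases K with
  | zero => simp [winH, hornerH]
  | succ K' =>
    have h := roll_step b cs (K' + 1) s (by omega) hs
    have hshape : (b * winH b cs (K' + 1) s - cs[s]'(by omega) * b ^ (K' + 1)) * b
          + cs[s + (K' + 1)]'hs * b
        = b * ((winH b cs (K' + 1) s - cs[s]'(by omega) * b ^ ((K' + 1) - 1)) * b
          + cs[s + (K' + 1)]'hs) := by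
      simp only [Nat.add_sub_cancel, pow_succ]
      ring
    rw [hshape, h]

-- B's rolling loop invariant
theorem B_loop (b : Int) (cs : List Int) (K : Nat) (t : Nat)
    (ht : K + t ≤ cs.length) :
    (PySem.List.pyRange (K : Int) ((K : Int) + (t : Int)) 1).foldl
      (fun (st : Int × List Int) j =>
        let h := (st.1 - PySem.List.pyGetD cs (j - (K : Int)) 0 * b ^ K) * b
                   + PySem.List.pyGetD cs j 0 * b
        (h, st.2 ++ [h]))
      (b * winH b cs K 0, [b * winH b cs K 0])
    = (b * winH b cs K t, (List.range (t + 1)).map (fun s => b * winH b cs K s)) := by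
  induction t with
  | zero => simp [PySem.List.pyRange_one_eq_nil, List.range_succ]
  | succ t ih =>
    have ht' : K + t ≤ cs.length := by omega
    have hcast : (K : Int) + ((t : Nat) + 1 : Nat) = ((K : Int) + (t : Int)) + 1 := by push_cast; ring
    rw [hcast, PySem.List.pyRange_one_succ_right (by omega), List.foldl_append, ih ht']
    have hst : t + K < cs.length := by omega
    have htN : t < cs.length := by omega
    have h1 : PySem.List.pyGetD cs ((K : Int) + (t : Int) - (K : Int)) 0 = cs[t]'htN := by
      have : (K : Int) + (t : Int) - (K : Int) = ((t : Nat) : Int) := by ring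
      rw [this, PySem.List.pyGetD_natCast]
      simp [List.getD_eq_getElem?_getD, htN]
    have h2 : PySem.List.pyGetD cs ((K : Int) + (t : Int)) 0 = cs[t + K]'hst := by
      have : (K : Int) + (t : Int) = ((t + K : Nat) : Int) := by push_cast; ring
      rw [this, PySem.List.pyGetD_natCast]
      simp [List.getD_eq_getElem?_getD, hst]
    simp only [List.foldl_cons, List.foldl_nil, h1, h2]
    rw [roll_step' b cs K t hst]
    refine Prod.ext rfl ?_
    simp only
    rw [List.range_succ (n := t + 1), List.map_append]
    rfl

-- the zip-sum of a window against the descending powers is b * Horner(window)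
theorem zipsum (b : Int) (l rest : List Int) (a : Int) :
    ((l ++ rest).zip ((List.range l.length).map (fun i => b ^ (l.length - i)))).foldl
      (fun (acc : Int) (cp : Int × Int) => acc + cp.1 * cp.2) a
    = a + b * hornerH b l := by
  induction l generalizing a rest with
  | nil => simp [hornerH]
  | cons c l ih =>
    rw [List.length_cons, List.range_succ_eq_map, List.map_cons, List.map_map]
    have hmap : (List.range l.length).map ((fun i => b ^ (l.length + 1 - i)) ∘ (fun i => i + 1))
        = (List.range l.length).map (fun i => b ^ (l.length - i)) := by
      refine List.map_congr_left ?_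
      intro i _
      simp [Function.comp, Nat.succ_sub_succ]
    rw [hmap, List.cons_append, List.zip_cons_cons, List.foldl_cons, ih]
    rw [hornerH_cons]
    simp only [Nat.sub_zero, pow_succ]
    ring

-- ===== VERDICT (by name: the statement is the Claim_ definition above) =====
theorem get_kgram_hashes_spec : Claim_equal_get_kgram_hashes := by
  intro url k_gram basis _ hpre
  unfold Spec_get_kgram_hashes
  simp only [get_kgram_hashes, get_kgram_hashes_alt]
  set cs : List Int := url.toList.map (fun c => (c.toNat : Int)) with hcs
  have hlen : cs.length = url.toList.length := by simp [hcs]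
  simp only [← hlen]
  have hk0 : (0 : Int) ≤ k_gram := hpre
  by_cases hsmall : (cs.length : Int) < k_gram
  · rw [if_pos hsmall,
      PySem.List.pyRange_one_eq_nil (a := 0) (b := (cs.length : Int) - k_gram + 1) (by omega)]
    rfl
  · push_neg at hsmall
    rw [if_neg (by omega : ¬ (cs.length : Int) < k_gram)]
    set K : Nat := k_gram.toNat with hKdef
    have hKcast : (K : Int) = k_gram := Int.toNat_of_nonneg hk0
    have hKle : K ≤ cs.length := by omega
    -- A's side: map of weighted window hashes over the starts
    have hA : (PySem.List.pyRange 0 ((cs.length : Int) - k_gram + 1) 1).foldl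
        (fun hashes start =>
          hashes ++ [(PySem.List.pyRange 0 k_gram 1).foldl
            (fun h i => h + PySem.List.pyGetD cs (start + i) 0 *
              PySem.List.pyGetD ((PySem.List.pyRange k_gram (-1) (-1)).map (fun i => basis ^ i.toNat)) i 0) 0])
        []
        = (List.range (cs.length - K + 1)).map (fun s => basis * winH basis cs K s) := by
      rw [PySem.List.foldl_append_singleton_eq_map]
      have hub : ((cs.length : Int) - k_gram + 1) = ((cs.length - K + 1 : Nat) : Int) := by
        push_cast; omega
      rw [hub, PySem.List.pyRange_zero_nat, List.map_map]
      refine List.map_congr_left ?_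
      intro s hsmem
      have hslt : s < cs.length - K + 1 := List.mem_range.mp hsmem
      have hs : s + K ≤ cs.length := by omega
      simp only [Function.comp]
      rw [← hKcast]
      have := A_inner_m basis cs K s K le_rfl hs
      rw [this]
      simp [winH]
    rw [hA]
    -- B's side: powers, initial zip-sum, then the rolling loop
    have hpow : (PySem.List.pyRange k_gram 0 (-1)).map (fun e => basis ^ e.toNat)
        = (List.range K).map (fun i => basis ^ (K - i)) := by
      rw [PySem.List.pyRange_neg_one, List.map_map]
      have hlen2 : (k_gram - 0).toNat = K := by omega
      rw [hlen2]
      refine List.map_congr_left ?_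
      intro i hi
      have : i < K := List.mem_range.mp hi
      simp only [Function.comp]
      congr 1
      omega
    have htakelen : (cs.take K).length = K := by
      simp [List.length_take, hKle]
    have hg0 : (cs.zip ((PySem.List.pyRange k_gram 0 (-1)).map (fun e => basis ^ e.toNat))).foldl
        (fun (a : Int) (cp : Int × Int) => a + cp.1 * cp.2) 0
        = basis * winH basis cs K 0 := by
      rw [hpow]
      have := zipsum basis (cs.take K) (cs.drop K) 0
      rw [List.take_append_drop, htakelen] at this
      rw [this]
      simp [winH, hornerH]
    have htop : basis ^ k_gram.toNat = basis ^ K := rfl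
    have hub2 : (cs.length : Int) = (K : Int) + ((cs.length - K : Nat) : Int) := by
      omega
    rw [hg0, htop, ← hKcast, hub2]
    rw [B_loop basis cs K (cs.length - K) (by omega)]
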